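-- pv_equiv track=rewrite | github.com/HarshKohli/leetcode_practice | target_sum.py | recurse_fast
-- ===== SOURCE A (Python) =====
-- def recurse_fast(nums, index, size):
--     num = nums[index]
--     if index == size - 1:
--         num = nums[index]
--         if num == 0:
--             return {0: 2}
--         return {-num: 1, num: 1}
--
--     next_vals = recurse_fast(nums, index + 1, size)
--     vals = {}
--
--     for val, count in next_vals.items():
--         num1, num2 = val + num, val - num
--         if num1 in vals:
--             vals[num1] = vals[num1] + count
--         else:
--             vals[num1] = count
--
--         if num2 in vals:
--             vals[num2] = vals[num2] + count
--         else:
--             vals[num2] = count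
--
--     return vals
-- ===== SOURCE B (Python) =====
-- def recurse_fast(nums, index, size):
--     indices = range(size - 1, index - 1, -1)
--     num = nums[indices[0]]
--     vals = {0: 2} if num == 0 else {-num: 1, num: 1}
--     for i in indices[1:]:
--         num = nums[i]
--         new_vals = {}
--         for val, count in vals.items():
--             for nv in (val + num, val - num):
--                 new_vals[nv] = new_vals.get(nv, 0) + count
--         vals = new_vals
--     return vals
-- ===== Notes on version B (the rewrite author's own statement) =====
-- stated objective: alternative
-- what changed: Replaces A's recursion from index down to the base case with an iterative dict fold: seed the distribution from nums[size-1] and fold over indices size-2 down to index, merging val+num/val-num counts into a fresh dict per element.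
import Mathlib
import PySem

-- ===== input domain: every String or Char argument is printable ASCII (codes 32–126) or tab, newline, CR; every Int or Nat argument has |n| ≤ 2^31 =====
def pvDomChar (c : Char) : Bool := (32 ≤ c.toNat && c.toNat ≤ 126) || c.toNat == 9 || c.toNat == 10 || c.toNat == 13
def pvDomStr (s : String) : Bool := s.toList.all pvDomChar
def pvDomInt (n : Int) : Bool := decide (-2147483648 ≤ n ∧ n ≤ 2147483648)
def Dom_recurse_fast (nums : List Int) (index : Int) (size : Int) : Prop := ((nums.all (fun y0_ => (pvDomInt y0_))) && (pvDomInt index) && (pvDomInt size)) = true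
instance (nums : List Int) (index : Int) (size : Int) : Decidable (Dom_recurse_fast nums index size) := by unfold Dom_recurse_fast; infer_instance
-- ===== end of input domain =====

-- B replaces A's recursion over index with an iterative fold over the indices size-2 .. index
-- (seeded from nums[size-1]'s base case) — an alternative decomposition of the same count-merging pass.


-- ===== PORT A =====
-- A's `if num_k in vals: vals[num_k] += count else: vals[num_k] = count`
def pvUpd (vals : PySem.Dict Int Int) (k c : Int) : PySem.Dict Int Int :=
  if vals.contains k then vals.insert k (vals.getD k 0 + c) else vals.insert k c

-- one iteration of A's `for val, count in next_vals.items():` loop body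
def pvStepA (vals : PySem.Dict Int Int) (p : Int × Int) (num : Int) : PySem.Dict Int Int :=
  pvUpd (pvUpd vals (p.1 + num) p.2) (p.1 - num) p.2

def recurse_fast (nums : List Int) (index : Int) (size : Int) : List (Int × Int) :=
  match PySem.List.pyGet? nums index with
  | none => []                                  -- IndexError: excluded by Pre_
  | some num =>
    if index = size - 1 then
      if num = 0 then [(0, 2)] else [(-num, 1), (num, 1)]
    else if _h : index < size - 1 then
      let next := recurse_fast nums (index + 1) size
      (next.foldl (fun vals p => pvStepA vals p num) PySem.Dict.empty).items
    else []                                     -- index > size-1: A's recursion climbs to an IndexError; excluded by Pre_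
termination_by (size - index).toNat
decreasing_by omega

-- ===== PORT B =====
-- B's inner loop: `for nv in (val+num, val-num): new_vals[nv] = new_vals.get(nv, 0) + count`
def pvStepB (vals : PySem.Dict Int Int) (num : Int) : PySem.Dict Int Int :=
  vals.items.foldl
    (fun nv p => [p.1 + num, p.1 - num].foldl (fun d k => d.insert k (d.getD k 0 + p.2)) nv)
    PySem.Dict.empty

def pvBaseB (num : Int) : PySem.Dict Int Int :=
  if num = 0 then PySem.Dict.mk [(0, 2)] else PySem.Dict.mk [(-num, 1), (num, 1)]

-- B's `for i in indices[1:]:` loop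
def pvLoopB (nums : List Int) (idxs : List Int) (base : PySem.Dict Int Int) : PySem.Dict Int Int :=
  idxs.foldl
    (fun vals i =>
      match PySem.List.pyGet? nums i with
      | none => PySem.Dict.empty                -- IndexError: unreachable under Pre_
      | some num => pvStepB vals num)
    base

def recurse_fast_alt (nums : List Int) (index : Int) (size : Int) : List (Int × Int) :=
  let indices := PySem.List.pyRange (size - 1) (index - 1) (-1)
  match PySem.List.pyGet? indices 0 with
  | none => []                                  -- indices[0]: IndexError on an empty range; excluded by Pre_
  | some i0 =>
    match PySem.List.pyGet? nums i0 with
    | none => []                                -- IndexError: excluded by Pre_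
    | some num0 => (pvLoopB nums (PySem.List.slice indices (some 1) none) (pvBaseB num0)).items

-- ===== PRECONDITION & SPEC =====
-- Exactly the inputs on which A returns: the recursion reads nums[index], …, nums[size-1],
-- so it returns iff index < size, index ≥ -len(nums) and size ≤ len(nums) (negative indices wrap).
def Pre_recurse_fast (nums : List Int) (index : Int) (size : Int) : Prop :=
  index < size ∧ -(nums.length : Int) ≤ index ∧ size ≤ (nums.length : Int)
instance (nums : List Int) (index : Int) (size : Int) : Decidable (Pre_recurse_fast nums index size) := by
  unfold Pre_recurse_fast; infer_instance

def pvWitness_recurse_fast : List Int × Int × Int := ([1, 0, 2], 0, 3)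

def Spec_recurse_fast (nums : List Int) (index : Int) (size : Int) (out : List (Int × Int)) : Prop := out = recurse_fast_alt nums index size
instance (nums : List Int) (index : Int) (size : Int) (out : List (Int × Int)) : Decidable (Spec_recurse_fast nums index size out) := by unfold Spec_recurse_fast; infer_instance

-- ===== CLAIM (what is proved, stated in full; the proofs are below) =====
def Claim_equal_recurse_fast : Prop := ∀ (nums : List Int) (index : Int) (size : Int), Dom_recurse_fast nums index size → Pre_recurse_fast nums index size → Spec_recurse_fast nums index size (recurse_fast nums index size)

-- ===== LEMMAS AND PROOFS =====

-- a successful index read under the bounds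
lemma pv_get_some (nums : List Int) (i : Int) (h1 : -(nums.length : Int) ≤ i)
    (h2 : i < (nums.length : Int)) : ∃ v, PySem.List.pyGet? nums i = some v := by
  cases h : PySem.List.pyGet? nums i with
  | none =>
    rw [PySem.List.pyGet?_eq_none_iff] at h
    exact absurd (by simp [PySem.Raise.InRange]; omega) h
  | some v => exact ⟨v, rfl⟩

-- A's update-or-insert equals B's get-then-insert
lemma pv_upd_eq (d : PySem.Dict Int Int) (k c : Int) :
    pvUpd d k c = d.insert k (d.getD k 0 + c) := by
  unfold pvUpd
  by_cases h : d.contains k = true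
  · simp [h]
  · rw [if_neg h, PySem.Dict.getD_of_not_contains d 0 (by simpa using h), zero_add]

-- A's loop body over one item equals B's inner two-element fold
lemma pv_step_item (vals : PySem.Dict Int Int) (p : Int × Int) (num : Int) :
    pvStepA vals p num
      = [p.1 + num, p.1 - num].foldl (fun d k => d.insert k (d.getD k 0 + p.2)) vals := by
  simp [pvStepA, List.foldl, pv_upd_eq]

-- peeling the first (highest) index off B's descending range
lemma pv_range_cons (a b : Int) (h : b < a) :
    PySem.List.pyRange a b (-1) = a :: PySem.List.pyRange (a - 1) b (-1) := by
  simp only [PySem.List.pyRange]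
  norm_num
  rw [if_pos h]
  have e : (a - b).toNat = (a - 1 - b).toNat + 1 := by omega
  have e2 : (if b < a - 1 then (a - 1 - b).toNat else 0) = (a - 1 - b).toNat := by
    split <;> omega
  rw [e, e2, List.range_succ_eq_map, List.map_cons, List.map_map]
  congr 1
  · norm_num
  · apply List.map_congr_left
    intro k _
    simp only [Function.comp_apply, Nat.succ_eq_add_one]
    push_cast
    ring

-- peeling the lowest index off B's descending range
lemma pv_range_negone (a b : Int) (h : b ≤ a) :
    PySem.List.pyRange a (b - 1) (-1) = PySem.List.pyRange a b (-1) ++ [b] := by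
  simp only [PySem.List.pyRange]
  norm_num
  rw [if_pos h]
  have e : (a - (b - 1)).toNat = (a - b).toNat + 1 := by omega
  rw [e, List.range_succ, List.map_append]
  rcases lt_or_eq_of_le h with hba | hba
  · rw [if_pos hba]
    congr 1
    simp only [List.map_cons, List.map_nil, List.cons.injEq, and_true]
    omega
  · subst hba
    rw [if_neg (lt_irrefl b)]
    simp

-- the core equivalence: A's recursion from index equals B's fold over size-2 .. index
lemma pv_main (nums : List Int) (size : Int) (num0 : Int)
    (hget : PySem.List.pyGet? nums (size - 1) = some num0)
    (hsz : size ≤ (nums.length : Int)) :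
    ∀ (k : Nat) (index : Int), (size - 1 - index).toNat = k →
      -(nums.length : Int) ≤ index → index < size →
      recurse_fast nums index size
        = (pvLoopB nums (PySem.List.pyRange (size - 2) (index - 1) (-1)) (pvBaseB num0)).items := by
  intro k
  induction k with
  | zero =>
    intro index hk h1 h2
    have hidx : index = size - 1 := by omega
    subst hidx
    rw [recurse_fast, hget]
    dsimp only
    rw [if_pos rfl]
    have hrange : PySem.List.pyRange (size - 2) (size - 1 - 1) (-1) = [] := by
      simp [PySem.List.pyRange]
    rw [hrange, pvLoopB]
    simp only [List.foldl_nil]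
    unfold pvBaseB
    by_cases h0 : num0 = 0 <;> simp [h0]
  | succ k ih =>
    intro index hk h1 h2
    have hlt : index < size - 1 := by omega
    obtain ⟨num, hnum⟩ := pv_get_some nums index h1 (by omega)
    rw [recurse_fast, hnum]
    dsimp only
    rw [if_neg (show ¬ index = size - 1 by omega), dif_pos hlt]
    have e : index + 1 - 1 = index := by ring
    have hih : recurse_fast nums (index + 1) size
        = (pvLoopB nums (PySem.List.pyRange (size - 2) index (-1)) (pvBaseB num0)).items := by
      have := ih (index + 1) (by omega) (by omega) (by omega)
      rwa [e] at this
    have hloop : pvLoopB nums (PySem.List.pyRange (size - 2) (index - 1) (-1)) (pvBaseB num0)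
        = pvStepB (pvLoopB nums (PySem.List.pyRange (size - 2) index (-1)) (pvBaseB num0)) num := by
      unfold pvLoopB
      rw [pv_range_negone (size - 2) index (by omega), List.foldl_append]
      simp only [List.foldl_cons, List.foldl_nil]
      rw [hnum]
    rw [hloop]
    unfold pvStepB
    rw [← hih]
    exact congrArg PySem.Dict.items (List.foldl_ext _ _ _ (fun vals p _ => pv_step_item vals p num))

-- ===== VERDICT (by name: the statement is the Claim_ definition above) =====
theorem recurse_fast_spec : Claim_equal_recurse_fast := by
  intro nums index size _hdom hpre
  obtain ⟨h1, h2, h3⟩ := hpre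
  obtain ⟨num0, hget⟩ := pv_get_some nums (size - 1) (by omega) (by omega)
  unfold Spec_recurse_fast recurse_fast_alt
  rw [pv_range_cons (size - 1) (index - 1) (by omega)]
  dsimp only
  rw [PySem.List.pyGet?_zero_cons]
  dsimp only
  rw [hget]
  dsimp only
  rw [PySem.List.slice_from_one, List.tail_cons]
  have e : size - 1 - 1 = size - 2 := by ring
  rw [e]
  exact pv_main nums size num0 hget h3 _ index rfl h2 h1
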